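-- pv_equiv track=rewrite | github.com/Serholst/adsgram-pipeline | telegram-scoring/pipeline/step1_message.py | _lookup_score
-- ===== SOURCE A (Python) =====
-- def _lookup_score(value: str, score_map: dict) -> int:
--     """Look up score from a YAML weight map: exact → case-insensitive → substring → default."""
--     if not value:
--         return score_map.get("default", 0)
--     if value in score_map:
--         return score_map[value]
--     lower = value.lower()
--     for key, val in score_map.items():
--         if key != "default" and key.lower() == lower:
--             return val
--     for key, val in score_map.items():
--         if key != "default" and key.lower() in lower:
--             return val
--     return score_map.get("default", 0)
-- ===== SOURCE B (Python) =====
-- def _lookup_score(value: str, score_map: dict) -> int: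
--     """Single merged pass: exact key, then one scan recording the first substring
--     fallback while an exact case-insensitive hit returns immediately."""
--     if not value:
--         return score_map.get("default", 0)
--     if value in score_map:
--         return score_map[value]
--     lower = value.lower()
--     fallback = None
--     for key, val in score_map.items():
--         if key == "default":
--             continue
--         kl = key.lower()
--         if kl == lower:
--             return val
--         if fallback is None and kl in lower:
--             fallback = val
--     return fallback if fallback is not None else score_map.get("default", 0)
-- ===== Notes on version B (the rewrite author's own statement) =====
-- stated objective: alternative
-- what changed: Replaced A's two separate scans (case-insensitive equality pass, then substring pass) by one merged pass that returns on an exact lowercase match and records the first substring match as a fallback.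
import Mathlib
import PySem

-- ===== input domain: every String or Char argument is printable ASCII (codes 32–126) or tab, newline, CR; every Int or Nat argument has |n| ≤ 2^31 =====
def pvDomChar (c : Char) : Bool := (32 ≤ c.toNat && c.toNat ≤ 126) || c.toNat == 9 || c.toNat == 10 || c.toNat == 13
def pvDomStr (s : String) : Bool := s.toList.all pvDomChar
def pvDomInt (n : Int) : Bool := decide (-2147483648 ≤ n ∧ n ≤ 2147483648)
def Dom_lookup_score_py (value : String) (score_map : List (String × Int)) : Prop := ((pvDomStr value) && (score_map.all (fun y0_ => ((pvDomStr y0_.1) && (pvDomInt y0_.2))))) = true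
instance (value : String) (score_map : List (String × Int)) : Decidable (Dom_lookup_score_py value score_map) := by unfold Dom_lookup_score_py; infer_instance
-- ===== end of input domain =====

-- B merges A's two fallback scans into one pass (exact case-insensitive match returns
-- immediately; the first substring match is recorded as a fallback): alternative decomposition, same cost.

-- shared helper: score_map.get("default", 0) (dict lookup = first match in the association list)
def pvGetDefault (score_map : List (String × Int)) : Int :=
  ((score_map.find? (fun p => p.1 == "default")).map (·.2)).getD 0

-- ===== PORT A =====
def lookup_score_py (value : String) (score_map : List (String × Int)) : Int :=
  if value = "" then
    pvGetDefault score_map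
  else
    match score_map.find? (fun p => p.1 == value) with
    | some p => p.2
    | none =>
      let lower := PySem.Str.lower value
      -- first for-loop: case-insensitive equality
      match score_map.find? (fun p => p.1 != "default" && PySem.Str.lower p.1 == lower) with
      | some p => p.2
      | none =>
        -- second for-loop: substring containment
        match score_map.find? (fun p => p.1 != "default" && PySem.Str.isIn (PySem.Str.lower p.1) lower) with
        | some p => p.2
        | none => pvGetDefault score_map

-- ===== PORT B =====
-- B's single merged loop: returns `some val` on an exact case-insensitive hit,
-- otherwise carries the first substring fallback in `fallback`.
def pvAltScan (lower : String) (fallback : Option Int) : List (String × Int) → Option Int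
  | [] => fallback
  | p :: rest =>
    if p.1 == "default" then pvAltScan lower fallback rest
    else
      let kl := PySem.Str.lower p.1
      if kl == lower then some p.2
      else if fallback.isNone && PySem.Str.isIn kl lower then pvAltScan lower (some p.2) rest
      else pvAltScan lower fallback rest

def lookup_score_py_alt (value : String) (score_map : List (String × Int)) : Int :=
  if value = "" then
    pvGetDefault score_map
  else
    match score_map.find? (fun p => p.1 == value) with
    | some p => p.2
    | none =>
      match pvAltScan (PySem.Str.lower value) none score_map with
      | some v => v
      | none => pvGetDefault score_map

-- ===== PRECONDITION & SPEC =====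
def Spec_lookup_score_py (value : String) (score_map : List (String × Int)) (out : Int) : Prop := out = lookup_score_py_alt value score_map
instance (value : String) (score_map : List (String × Int)) (out : Int) : Decidable (Spec_lookup_score_py value score_map out) := by unfold Spec_lookup_score_py; infer_instance

-- ===== CLAIM (what is proved, stated in full; the proofs are below) =====
def Claim_equal_lookup_score_py : Prop := ∀ (value : String) (score_map : List (String × Int)), Dom_lookup_score_py value score_map → Spec_lookup_score_py value score_map (lookup_score_py value score_map)

-- ===== LEMMAS AND PROOFS =====

-- B's merged scan computes: first exact case-insensitive match if any, else the
-- incoming fallback, else the first substring match.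
theorem pvAltScan_eq (lower : String) (fb : Option Int) (m : List (String × Int)) :
    pvAltScan lower fb m =
      match m.find? (fun p => p.1 != "default" && PySem.Str.lower p.1 == lower) with
      | some p => some p.2
      | none => fb.or ((m.find? (fun p => p.1 != "default" && PySem.Str.isIn (PySem.Str.lower p.1) lower)).map (·.2)) := by
  induction m generalizing fb with
  | nil => cases fb <;> simp [pvAltScan]
  | cons p rest ih =>
    by_cases hd : (p.1 == "default") = true
    · simp [pvAltScan, bne, hd, ih]
    · by_cases he : (PySem.Str.lower p.1 == lower) = true
      · simp [pvAltScan, bne, hd, he]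
      · by_cases hs : PySem.Chars.isIn (PySem.Chars.lower p.1.toList) lower.toList = true
        · cases fb <;> simp [pvAltScan, bne, hd, he, hs, ih]
        · simp [pvAltScan, bne, hd, he, hs, ih]

-- ===== VERDICT (by name: the statement is the Claim_ definition above) =====
theorem lookup_score_py_spec : Claim_equal_lookup_score_py := by
  intro value score_map _
  unfold Spec_lookup_score_py lookup_score_py lookup_score_py_alt
  by_cases hv : value = ""
  · simp [hv]
  · simp only [hv, if_false]
    cases score_map.find? (fun p => p.1 == value) with
    | some p => rfl
    | none =>
      simp only [pvAltScan_eq]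
      cases score_map.find? (fun p => p.1 != "default" && PySem.Str.lower p.1 == PySem.Str.lower value) with
      | some p => rfl
      | none =>
        simp only [Option.none_or]
        cases score_map.find? (fun p => p.1 != "default" && PySem.Str.isIn (PySem.Str.lower p.1) (PySem.Str.lower value)) with
        | some p => rfl
        | none => rfl
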